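-- pv_equiv track=rewrite | github.com/Santiagolainen/ejercicios-AED | Ficha10E2.py | sucesion_123
-- ===== SOURCE A (Python) =====
-- def sucesion_123(nums):
--     cont_suc_123 = 0
--     for i in range(len(nums) - 2):
--         num_posterior = nums[i + 1]
--         num_posterior2 = nums[i + 2]
--         if nums[i] == 1 and num_posterior == 2 and num_posterior2 == 3:
--             cont_suc_123 += 1
--
--     return cont_suc_123
-- ===== SOURCE B (Python) =====
-- def sucesion_123(nums):
--     # single pass automaton tracking how much of the pattern 1,2,3 has matched
--     state = 0
--     count = 0
--     for x in nums:
--         if state == 2 and x == 3: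
--             count += 1
--             state = 0
--         elif x == 1:
--             state = 1
--         elif state == 1 and x == 2:
--             state = 2
--         else:
--             state = 0
--     return count
-- ===== Notes on version B (the rewrite author's own statement) =====
-- stated objective: alternative
-- what changed: Replaced the three-offset indexed window scan with a single forward pass maintaining a 3-state match-progress automaton (no indexing at all).
import Mathlib
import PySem

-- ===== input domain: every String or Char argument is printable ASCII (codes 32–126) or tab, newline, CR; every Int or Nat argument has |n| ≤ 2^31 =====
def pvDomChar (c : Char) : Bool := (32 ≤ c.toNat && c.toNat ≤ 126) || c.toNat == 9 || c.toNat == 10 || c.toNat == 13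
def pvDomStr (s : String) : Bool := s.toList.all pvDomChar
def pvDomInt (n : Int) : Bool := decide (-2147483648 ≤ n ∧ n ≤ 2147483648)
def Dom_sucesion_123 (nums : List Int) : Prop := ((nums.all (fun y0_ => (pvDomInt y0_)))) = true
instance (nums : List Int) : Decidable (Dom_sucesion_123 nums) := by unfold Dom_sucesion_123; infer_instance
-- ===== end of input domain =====

-- B replaces the three-offset indexed window scan by a single forward pass with a
-- 3-state match-progress automaton (objective: alternative decomposition, same cost).

-- ===== PORT A =====
def sucesion_123 (nums : List Int) : Int :=
  (PySem.List.pyRange 0 ((nums.length : Int) - 2) 1).foldl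
    (fun cont_suc_123 i =>
      let num_posterior := PySem.List.pyGetD nums (i + 1) 0
      let num_posterior2 := PySem.List.pyGetD nums (i + 2) 0
      if PySem.List.pyGetD nums i 0 = 1 ∧ num_posterior = 2 ∧ num_posterior2 = 3 then
        cont_suc_123 + 1
      else cont_suc_123) 0

-- ===== PORT B =====
def sucesion123Auto : List Int → Int → Int → Int
  | [], _, count => count
  | x :: rest, state, count =>
    if state = 2 ∧ x = 3 then sucesion123Auto rest 0 (count + 1)
    else if x = 1 then sucesion123Auto rest 1 count
    else if state = 1 ∧ x = 2 then sucesion123Auto rest 2 count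
    else sucesion123Auto rest 0 count

def sucesion_123_alt (nums : List Int) : Int := sucesion123Auto nums 0 0

-- ===== PRECONDITION & SPEC =====
def Spec_sucesion_123 (nums : List Int) (out : Int) : Prop := out = sucesion_123_alt nums
instance (nums : List Int) (out : Int) : Decidable (Spec_sucesion_123 nums out) := by unfold Spec_sucesion_123; infer_instance

-- ===== CLAIM (what is proved, stated in full; the proofs are below) =====
def Claim_equal_sucesion_123 : Prop := ∀ (nums : List Int), Dom_sucesion_123 nums → Spec_sucesion_123 nums (sucesion_123 nums)

-- ===== LEMMAS AND PROOFS =====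

/-- bonus counted from state 1: +1 iff the list starts 2,3 -/
def pad2 (t : List Int) : Int := if t.getD 0 0 = 2 ∧ t.getD 1 0 = 3 then 1 else 0
/-- bonus counted from state 2: +1 iff the list starts 3 -/
def pad3 (t : List Int) : Int := if t.getD 0 0 = 3 then 1 else 0

/-- number of 1,2,3 triples, one-step recursion (proof intermediary) -/
def countT : List Int → Int
  | [] => 0
  | x :: t => (if x = 1 then pad2 t else 0) + countT t

lemma auto_char (xs : List Int) : ∀ c : Int,
    sucesion123Auto xs 0 c = c + countT xs ∧
    sucesion123Auto xs 1 c = c + countT xs + pad2 xs ∧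
    sucesion123Auto xs 2 c = c + countT xs + pad3 xs := by
  induction xs with
  | nil => intro c; simp [sucesion123Auto, countT, pad2, pad3]
  | cons x t ih =>
    intro c
    obtain ⟨h0, h1, h2⟩ := ih c
    obtain ⟨g0, g1, g2⟩ := ih (c + 1)
    have hct : countT (x :: t) = (if x = 1 then pad2 t else 0) + countT t := rfl
    have hp2 : pad2 (x :: t) = if x = 2 ∧ t.getD 0 0 = 3 then 1 else 0 := by
      simp [pad2]
    have hp3 : pad3 (x :: t) = if x = 3 then 1 else 0 := by
      simp [pad3]
    refine ⟨?_, ?_, ?_⟩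
    · -- state 0
      by_cases hx1 : x = 1
      · simp only [sucesion123Auto, hct]
        rw [if_neg (by omega), if_pos hx1, if_pos hx1, h1]
        ring
      · simp only [sucesion123Auto, hct]
        rw [if_neg (by omega), if_neg hx1, if_neg (by omega), if_neg hx1, h0]
        ring
    · -- state 1
      by_cases hx1 : x = 1
      · simp only [sucesion123Auto, hct, hp2]
        rw [if_neg (by omega), if_pos hx1, if_pos hx1, if_neg (by omega), h1]
        ring
      · by_cases hx2 : x = 2
        · simp only [sucesion123Auto, hct, hp2]
          rw [if_neg (by omega), if_neg hx1, if_pos ⟨by trivial, hx2⟩, if_neg hx1, h2]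
          unfold pad3
          by_cases h3 : t.getD 0 0 = 3
          · rw [if_pos h3, if_pos ⟨hx2, h3⟩]; ring
          · rw [if_neg h3, if_neg (by tauto)]; ring
        · simp only [sucesion123Auto, hct, hp2]
          rw [if_neg (by omega), if_neg hx1, if_neg (by tauto), if_neg hx1,
            if_neg (by tauto), h0]
          ring
    · -- state 2
      by_cases hx3 : x = 3
      · simp only [sucesion123Auto, hct, hp3]
        rw [if_pos ⟨by trivial, hx3⟩, if_neg (by omega), if_pos hx3, g0]
        ring
      · by_cases hx1 : x = 1
        · simp only [sucesion123Auto, hct, hp3]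
          rw [if_neg (by tauto), if_pos hx1, if_pos hx1, if_neg hx3, h1]
          ring
        · simp only [sucesion123Auto, hct, hp3]
          rw [if_neg (by tauto), if_neg hx1, if_neg (by omega), if_neg hx1,
            if_neg hx3, h0]
          ring

/-- the triple indicator A checks at Int index k -/
def indk (nums : List Int) (k : Int) : Int :=
  if PySem.List.pyGetD nums k 0 = 1 ∧ PySem.List.pyGetD nums (k + 1) 0 = 2 ∧
      PySem.List.pyGetD nums (k + 2) 0 = 3 then 1 else 0

lemma foldl_if_sum (p : Int → Prop) [DecidablePred p] (l : List Int) : ∀ a : Int,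
    l.foldl (fun acc i => if p i then acc + 1 else acc) a
      = a + (l.map (fun i => if p i then (1 : Int) else 0)).sum := by
  induction l with
  | nil => intro a; simp
  | cons x t ih =>
    intro a
    by_cases h : p x
    · simp only [List.foldl_cons, List.map_cons, List.sum_cons, if_pos h, ih]; ring
    · simp only [List.foldl_cons, List.map_cons, List.sum_cons, if_neg h, ih]; ring

lemma a_eq_sum (nums : List Int) :
    sucesion_123 nums
      = ((PySem.List.pyRange 0 ((nums.length : Int) - 2) 1).map (indk nums)).sum := by
  unfold sucesion_123
  rw [foldl_if_sum (fun i => PySem.List.pyGetD nums i 0 = 1 ∧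
    PySem.List.pyGetD nums (i + 1) 0 = 2 ∧ PySem.List.pyGetD nums (i + 2) 0 = 3)]
  norm_num
  rfl

lemma pyGetD_cons_shift (x : Int) (t : List Int) (i : Int) (hi : 0 ≤ i) :
    PySem.List.pyGetD (x :: t) (i + 1) 0 = PySem.List.pyGetD t i 0 := by
  have h : i = ((i.toNat : Nat) : Int) := by omega
  rw [h]
  have h1 : ((i.toNat : Nat) : Int) + 1 = ((i.toNat + 1 : Nat) : Int) := by push_cast; ring
  rw [h1, PySem.List.pyGetD_natCast, PySem.List.pyGetD_natCast, List.getD_cons_succ]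

lemma sum_cons_step (x : Int) (t : List Int) :
    ((PySem.List.pyRange 0 (((x :: t).length : Int) - 2) 1).map (indk (x :: t))).sum
      = (if x = 1 then pad2 t else 0)
        + ((PySem.List.pyRange 0 ((t.length : Int) - 2) 1).map (indk t)).sum := by
  have hlen : (((x :: t).length : Int) - 2) = (t.length : Int) - 1 := by
    simp; omega
  rw [hlen]
  by_cases ht : (t.length : Int) - 1 ≤ 0
  · rw [PySem.List.pyRange_one_eq_nil (by omega), PySem.List.pyRange_one_eq_nil (by omega)]
    have hn1 : t[1]? = none := by rw [List.getElem?_eq_none_iff]; omega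
    simp [pad2, List.getD, hn1]
  · have ht' : 0 < (t.length : Int) - 1 := by omega
    clear ht
    have h2 : 2 ≤ t.length := by omega
    rw [PySem.List.pyRange_one_cons (by omega), show (0 : Int) + 1 = 1 from by norm_num]
    simp only [List.map_cons, List.sum_cons]
    congr 1
    · -- head term: indk (x::t) 0 = if x = 1 then pad2 t else 0
      unfold indk pad2
      have e0 : PySem.List.pyGetD (x :: t) 0 0 = x := PySem.List.pyGetD_zero_cons x t 0
      have e1 : PySem.List.pyGetD (x :: t) (0 + 1) 0 = PySem.List.pyGetD t 0 0 :=
        pyGetD_cons_shift x t 0 (by omega)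
      have e2 : PySem.List.pyGetD (x :: t) (0 + 2) 0 = PySem.List.pyGetD t 1 0 := by
        have : (0 : Int) + 2 = 1 + 1 := by ring
        rw [this, pyGetD_cons_shift x t 1 (by omega)]
      rw [e0, e1, e2]
      have f0 : PySem.List.pyGetD t 0 0 = t.getD 0 0 := by
        have : (0 : Int) = ((0 : Nat) : Int) := by norm_num
        rw [this, PySem.List.pyGetD_natCast]
      have f1 : PySem.List.pyGetD t 1 0 = t.getD 1 0 := by
        have : (1 : Int) = ((1 : Nat) : Int) := by norm_num
        rw [this, PySem.List.pyGetD_natCast]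
      rw [f0, f1]
      by_cases hx : x = 1
      · simp [hx]
      · simp [hx]
    · -- tail: shift the range by one
      rw [PySem.List.pyRange_one 1 ((t.length : Int) - 1),
        PySem.List.pyRange_one 0 ((t.length : Int) - 2)]
      have hn : (((t.length : Int) - 1) - 1).toNat = (((t.length : Int) - 2) - 0).toNat := by
        omega
      rw [hn, List.map_map, List.map_map]
      congr 1
      apply List.map_congr_left
      intro k _
      simp only [Function.comp]
      unfold indk
      rw [show (1 : Int) + (k : Int) = (k : Int) + 1 from by ring,
        show (k : Int) + 1 + 2 = ((k : Int) + 2) + 1 from by ring,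
        pyGetD_cons_shift x t (k : Int) (by positivity),
        pyGetD_cons_shift x t ((k : Int) + 1) (by positivity),
        pyGetD_cons_shift x t ((k : Int) + 2) (by positivity)]
      norm_num

lemma a_eq_countT (nums : List Int) : sucesion_123 nums = countT nums := by
  induction nums with
  | nil => rfl
  | cons x t ih =>
    rw [a_eq_sum, sum_cons_step, ← a_eq_sum, ih, countT]

-- ===== VERDICT (by name: the statement is the Claim_ definition above) =====
theorem sucesion_123_spec : Claim_equal_sucesion_123 := by
  intro nums _
  unfold Spec_sucesion_123 sucesion_123_alt
  rw [a_eq_countT]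
  have := (auto_char nums 0).1
  omega
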